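-- pv_equiv track=rewrite | github.com/p20y/rainier-mcp | src/amazon_ads_mcp/utils/header_resolver.py | _prefer
-- ===== SOURCE A (Python) =====
-- from typing import Iterable, Optional, Set
--
-- def _prefer(names: Iterable[str], fallbacks: Iterable[str]) -> Optional[str]:
--     """
--     Select the preferred header name from discovered names.
--
--     Prefers Amazon-Advertising-API-* headers over others.
--     """
--     discovered = [n for n in dict.fromkeys(names) if n]
--     if discovered:
--         # Prefer Amazon-Advertising-API-* headers
--         aa = [
--             n for n in discovered if n.lower().startswith("amazon-advertising-api-")
--         ]
--         return aa[0] if aa else discovered[0]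
--
--     # Use fallback if no discovered names
--     for f in fallbacks:
--         return f
--     return None
-- ===== SOURCE B (Python) =====
-- from typing import Iterable, Optional
--
-- def _prefer(names: Iterable[str], fallbacks: Iterable[str]) -> Optional[str]:
--     """Single early-terminating scan: return the first Amazon-Advertising-API-*
--     name immediately, else the first non-empty name, else the first fallback."""
--     first_non_empty = None
--     for n in names:
--         if not n:
--             continue
--         if n.lower().startswith("amazon-advertising-api-"):
--             return n
--         if first_non_empty is None:
--             first_non_empty = n
--     if first_non_empty is not None:
--         return first_non_empty
--     for f in fallbacks:
--         return f
--     return None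
-- ===== Notes on version B (the rewrite author's own statement) =====
-- stated objective: simpler
-- what changed: Replaces dict.fromkeys dedup plus two list-comprehension filter passes with one early-terminating scan that returns the first Amazon-Advertising-API-* name immediately and otherwise remembers the first non-empty name (dedup becomes unnecessary since only first occurrences matter).
import Mathlib
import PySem

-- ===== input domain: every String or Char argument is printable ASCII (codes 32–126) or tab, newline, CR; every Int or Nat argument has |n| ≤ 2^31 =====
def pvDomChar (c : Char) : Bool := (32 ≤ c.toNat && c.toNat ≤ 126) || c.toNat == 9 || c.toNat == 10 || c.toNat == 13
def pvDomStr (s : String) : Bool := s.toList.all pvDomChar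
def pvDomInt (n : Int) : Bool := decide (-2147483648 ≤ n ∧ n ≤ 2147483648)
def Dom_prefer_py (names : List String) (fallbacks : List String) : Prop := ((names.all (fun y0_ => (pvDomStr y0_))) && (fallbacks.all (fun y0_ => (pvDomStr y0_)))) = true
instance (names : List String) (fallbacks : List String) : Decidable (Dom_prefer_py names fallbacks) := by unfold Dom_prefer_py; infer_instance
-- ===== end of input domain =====

-- B replaces A's dict.fromkeys dedup plus two filter passes by one early-terminating
-- scan keeping a single "first non-empty" candidate (objective: simpler).

-- n.lower().startswith("amazon-advertising-api-")  (shared by both ports)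
def pvIsAA (n : String) : Bool :=
  PySem.Str.startswith (PySem.Str.lower n) "amazon-advertising-api-"

-- Python truthiness of a string: n is truthy iff n != ""
def pvNe (n : String) : Bool := n != ""

-- ===== PORT A =====
def prefer_py (names : List String) (fallbacks : List String) : Option String :=
  -- discovered = [n for n in dict.fromkeys(names) if n]
  let discovered := (PySem.List.dedup names).filter pvNe
  match discovered with
  | d :: _ =>
    -- aa = [n for n in discovered if n.lower().startswith("amazon-advertising-api-")]
    -- return aa[0] if aa else discovered[0]
    match discovered.filter pvIsAA with
    | a :: _ => some a
    | [] => some d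
  | [] =>
    -- for f in fallbacks: return f
    match fallbacks with
    | f :: _ => some f
    | [] => none

-- ===== PORT B =====
-- the scan loop of Source B: early return on an Amazon-Advertising-API-* name,
-- otherwise remember the first non-empty name
def pvScanB : List String → Option String → Option String
  | [], first => first
  | n :: rest, first =>
    if pvNe n then
      if pvIsAA n then some n
      else pvScanB rest (if first.isNone then some n else first)
    else pvScanB rest first

def prefer_py_alt (names : List String) (fallbacks : List String) : Option String :=
  match pvScanB names none with
  | some x => some x
  | none =>
    match fallbacks with
    | f :: _ => some f
    | [] => none

-- ===== PRECONDITION & SPEC =====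
def Spec_prefer_py (names : List String) (fallbacks : List String) (out : Option String) : Prop := out = prefer_py_alt names fallbacks
instance (names : List String) (fallbacks : List String) (out : Option String) : Decidable (Spec_prefer_py names fallbacks out) := by unfold Spec_prefer_py; infer_instance

-- ===== CLAIM (what is proved, stated in full; the proofs are below) =====
def Claim_equal_prefer_py : Prop := ∀ (names : List String) (fallbacks : List String), Dom_prefer_py names fallbacks → Spec_prefer_py names fallbacks (prefer_py names fallbacks)

-- ===== LEMMAS AND PROOFS =====

-- find? over the Set.add fold (hence over dedup) sees the same first match as the list itself
theorem find?_foldl_add (p : String → Bool) :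
    ∀ (l s : List String),
      List.find? p (l.foldl PySem.Set.add s) = (List.find? p s).or (List.find? p l)
  | [], s => by simp
  | x :: rest, s => by
    show List.find? p (rest.foldl PySem.Set.add (PySem.Set.add s x)) = _
    rw [find?_foldl_add p rest]
    show (List.find? p (if s.contains x then s else s ++ [x])).or _ = _
    by_cases h : s.contains x
    · simp only [h, if_true]
      by_cases hp : p x
      · have hx : x ∈ s := by simpa using h
        cases hfs : List.find? p s with
        | none => exact absurd hp (by simpa using (List.find?_eq_none.mp hfs x hx))
        | some y => simp
      · simp [hp]
    · simp only [h]
      simp [List.find?_cons]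
      by_cases hp : p x <;> simp [hp]

theorem find?_dedup (p : String → Bool) (l : List String) :
    List.find? p (PySem.List.dedup l) = List.find? p l := by
  rw [PySem.List.dedup_eq_ofList, PySem.Set.ofList_eq_foldl, find?_foldl_add]
  simp

-- B's scan returns the first AA name, else the remembered candidate, else the first non-empty name
theorem pvScanB_spec :
    ∀ (l : List String) (first : Option String),
      pvScanB l first =
        match List.find? (fun n => pvNe n && pvIsAA n) l with
        | some a => some a
        | none => first.or (List.find? pvNe l)
  | [], first => by simp [pvScanB]
  | n :: rest, first => by
    by_cases hne : pvNe n
    · by_cases haa : pvIsAA n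
      · simp [pvScanB, hne, haa]
      · rw [show pvScanB (n :: rest) first
              = pvScanB rest (if first.isNone then some n else first) from by
              simp [pvScanB, hne, haa]]
        rw [pvScanB_spec rest]
        have hfirst : (if first.isNone then some n else first) = first.or (some n) := by
          cases first <;> rfl
        simp only [List.find?_cons, hne, haa, Bool.and_false, hfirst, Option.or_assoc]
        simp
    · rw [show pvScanB (n :: rest) first = pvScanB rest first from by simp [pvScanB, hne]]
      rw [pvScanB_spec rest,
          List.find?_cons_of_neg (p := fun n => pvNe n && pvIsAA n) (l := rest) (by simp [hne]),
          List.find?_cons_of_neg (p := pvNe) (l := rest) (by simpa using hne)]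

-- ===== VERDICT (by name: the statement is the Claim_ definition above) =====
theorem prefer_py_spec : Claim_equal_prefer_py := by
  intro names fallbacks _
  unfold Spec_prefer_py prefer_py prefer_py_alt
  rw [pvScanB_spec names none]
  have hfilterAA :
      List.find? pvIsAA ((PySem.List.dedup names).filter pvNe)
        = List.find? (fun n => pvNe n && pvIsAA n) names := by
    rw [List.find?_filter, ← find?_dedup (fun n => pvNe n && pvIsAA n) names]
    congr 1
    funext x
    by_cases h1 : pvNe x <;> by_cases h2 : pvIsAA x <;> simp [h1, h2]
  have hfilterNe :
      List.find? pvNe (PySem.List.dedup names) = List.find? pvNe names :=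
    find?_dedup pvNe names
  cases hD : (PySem.List.dedup names).filter pvNe with
  | nil =>
    have h2 : List.find? pvNe names = none := by
      rw [← hfilterNe, ← List.head?_filter, hD]; rfl
    have h1 : List.find? (fun n => pvNe n && pvIsAA n) names = none := by
      rw [List.find?_eq_none] at h2 ⊢
      intro x hx
      simp [h2 x hx]
    simp [h1, h2]
  | cons d tail =>
    have hd : List.find? pvNe names = some d := by
      rw [← hfilterNe, ← List.head?_filter, hD]; rfl
    cases hF : ((PySem.List.dedup names).filter pvNe).filter pvIsAA with
    | nil =>
      have h1 : List.find? (fun n => pvNe n && pvIsAA n) names = none := by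
        rw [← hfilterAA, ← List.head?_filter, hF]; rfl
      rw [hD] at hF
      simp [hF, h1, hd]
    | cons a t =>
      have h1 : List.find? (fun n => pvNe n && pvIsAA n) names = some a := by
        rw [← hfilterAA, ← List.head?_filter, hF]; rfl
      rw [hD] at hF
      simp [hF, h1]
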